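-- pv_equiv track=rewrite | github.com/Embroidermodder/Embroidermodder | src/libembroidery-python/libembroidery/parser.py | identify_leaf
-- ===== SOURCE A (Python) =====
-- def identify_leaf(exp):
--     """
--     Find an expression with no parentheses within it that
--     can be resolved.
--     """
--     for i in range(len(exp)):
--         if exp[i] == "(":
--             for j in range(i+1, len(exp)):
--                 if exp[j] == "(":
--                     break
--                 if exp[j] == ")":
--                     return exp[i:j+1]
--     return exp
-- ===== SOURCE B (Python) =====
-- def identify_leaf(exp):
--     """
--     Find an expression with no parentheses within it that
--     can be resolved.
--     """
--     last_open = None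
--     for i, c in enumerate(exp):
--         if c == "(":
--             last_open = i
--         elif c == ")" and last_open is not None:
--             return exp[last_open:i+1]
--     return exp
-- ===== Notes on version B (the rewrite author's own statement) =====
-- stated objective: simpler
-- what changed: Replaced A's nested scan (restarting a forward scan at every open paren) by a single left-to-right pass that tracks the index of the most recent open paren and returns at the first close paren preceded by one.
import Mathlib
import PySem

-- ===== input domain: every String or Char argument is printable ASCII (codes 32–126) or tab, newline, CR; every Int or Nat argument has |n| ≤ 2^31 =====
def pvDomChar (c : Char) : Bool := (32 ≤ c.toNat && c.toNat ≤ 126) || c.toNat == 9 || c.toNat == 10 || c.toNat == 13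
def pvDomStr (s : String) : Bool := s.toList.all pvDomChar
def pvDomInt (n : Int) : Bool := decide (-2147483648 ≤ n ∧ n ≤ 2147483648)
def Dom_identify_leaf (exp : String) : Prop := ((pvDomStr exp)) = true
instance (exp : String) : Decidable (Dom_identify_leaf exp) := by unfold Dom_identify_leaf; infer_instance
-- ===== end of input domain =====

-- B replaces A's nested rescans by one left-to-right pass tracking the most recent open paren (simpler single loop).

-- ===== PORT A =====
-- inner loop: 'for j in range(i+1, len(exp)) …'; returns some slice on 'return', none when it
-- breaks on '(' or runs off the end.
def pvAInner (exp : String) (n i j : Nat) : Option String :=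
  if _h : j < n then
    if PySem.Str.pyGet? exp (j : Int) == some '(' then none
    else if PySem.Str.pyGet? exp (j : Int) == some ')' then
      some (PySem.Str.slice exp (some (i : Int)) (some ((j : Int) + 1)))
    else pvAInner exp n i (j + 1)
  else none
termination_by n - j

-- outer loop: 'for i in range(len(exp)) …'
def pvAOuter (exp : String) (n i : Nat) : Option String :=
  if _h : i < n then
    if PySem.Str.pyGet? exp (i : Int) == some '(' then
      match pvAInner exp n i (i + 1) with
      | some r => some r
      | none => pvAOuter exp n (i + 1)
    else pvAOuter exp n (i + 1)
  else none
termination_by n - i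

def identify_leaf (exp : String) : String :=
  match pvAOuter exp exp.toList.length 0 with
  | some r => r
  | none => exp

-- ===== PORT B =====
-- single pass: 'for i, c in enumerate(exp)' carrying last_open.
def pvBGo (exp : String) (n i : Nat) (lastOpen : Option Nat) : Option String :=
  if _h : i < n then
    if PySem.Str.pyGet? exp (i : Int) == some '(' then pvBGo exp n (i + 1) (some i)
    else if PySem.Str.pyGet? exp (i : Int) == some ')' then
      match lastOpen with
      | some k => some (PySem.Str.slice exp (some (k : Int)) (some ((i : Int) + 1)))
      | none => pvBGo exp n (i + 1) lastOpen
    else pvBGo exp n (i + 1) lastOpen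
  else none
termination_by n - i

def identify_leaf_alt (exp : String) : String :=
  match pvBGo exp exp.toList.length 0 none with
  | some r => r
  | none => exp

-- ===== PRECONDITION & SPEC =====
def Spec_identify_leaf (exp : String) (out : String) : Prop := out = identify_leaf_alt exp
instance (exp : String) (out : String) : Decidable (Spec_identify_leaf exp out) := by unfold Spec_identify_leaf; infer_instance

-- ===== CLAIM (what is proved, stated in full; the proofs are below) =====
def Claim_equal_identify_leaf : Prop := ∀ (exp : String), Dom_identify_leaf exp → Spec_identify_leaf exp (identify_leaf exp)

-- ===== LEMMAS AND PROOFS =====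

-- a position carrying neither paren
def pvNonParen (exp : String) (p : Nat) : Prop :=
  (PySem.Str.pyGet? exp (p : Int) == some '(') = false ∧
  (PySem.Str.pyGet? exp (p : Int) == some ')') = false

-- the inner loop skips a run of non-paren characters
theorem pvAInner_skip (exp : String) (n k : Nat) :
    ∀ (m a b : Nat), b - a ≤ m → a ≤ b → b ≤ n →
      (∀ p, a ≤ p → p < b → pvNonParen exp p) →
      pvAInner exp n k a = pvAInner exp n k b := by
  intro m
  induction m with
  | zero =>
    intro a b h1 h2 _ _
    have hab : a = b := by omega
    rw [hab]
  | succ m ih =>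
    intro a b h1 h2 h3 h4
    rcases Nat.eq_or_lt_of_le h2 with rfl | hlt
    · rfl
    · have ha : a < n := by omega
      obtain ⟨hno, hnc⟩ := h4 a le_rfl hlt
      rw [pvAInner, dif_pos ha]
      simp only [hno, hnc, Bool.false_eq_true, if_false]
      exact ih (a + 1) b (by omega) (by omega) h3 (fun p hp1 hp2 => h4 p (by omega) hp2)

-- the outer loop skips a run of positions not holding '('
theorem pvAOuter_skip (exp : String) (n : Nat) :
    ∀ (m a b : Nat), b - a ≤ m → a ≤ b → b ≤ n →
      (∀ p, a ≤ p → p < b → (PySem.Str.pyGet? exp (p : Int) == some '(') = false) →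
      pvAOuter exp n a = pvAOuter exp n b := by
  intro m
  induction m with
  | zero =>
    intro a b h1 h2 _ _
    have hab : a = b := by omega
    rw [hab]
  | succ m ih =>
    intro a b h1 h2 h3 h4
    rcases Nat.eq_or_lt_of_le h2 with rfl | hlt
    · rfl
    · have ha : a < n := by omega
      rw [pvAOuter, dif_pos ha]
      simp only [h4 a le_rfl hlt, Bool.false_eq_true, if_false]
      exact ih (a + 1) b (by omega) (by omega) h3 (fun p hp1 hp2 => h4 p (by omega) hp2)

theorem pvAInner_end (exp : String) (n k : Nat) : pvAInner exp n k n = none := by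
  rw [pvAInner]; simp

theorem pvAOuter_end (exp : String) (n : Nat) : pvAOuter exp n n = none := by
  rw [pvAOuter]; simp

-- A's outer loop restarted at a '(' followed only by non-parens up to the end returns none
theorem pvA_dead (exp : String) (n k : Nat) (hkn : k < n)
    (hk : (PySem.Str.pyGet? exp (k : Int) == some '(') = true)
    (hrun : ∀ p, k < p → p < n → pvNonParen exp p) :
    pvAOuter exp n k = none := by
  rw [pvAOuter, dif_pos hkn, hk, if_pos rfl]
  rw [pvAInner_skip exp n k (n - (k+1)) (k+1) n (by omega) (by omega) le_rfl
    (fun p hp1 hp2 => hrun p (by omega) hp2)]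
  rw [pvAInner_end]
  exact (pvAOuter_skip exp n (n - (k+1)) (k+1) n (by omega) (by omega) le_rfl
    (fun p hp1 hp2 => (hrun p (by omega) hp2).1)).trans (pvAOuter_end exp n)

-- A's outer loop restarted at a '(' whose next paren is another '(' at i advances to i
theorem pvA_jump (exp : String) (n k i : Nat) (hkn : k < n) (hki : k < i) (hi : i < n)
    (hk : (PySem.Str.pyGet? exp (k : Int) == some '(') = true)
    (hopi : (PySem.Str.pyGet? exp (i : Int) == some '(') = true)
    (hrun : ∀ p, k < p → p < i → pvNonParen exp p) :
    pvAOuter exp n k = pvAOuter exp n i := by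
  rw [pvAOuter, dif_pos hkn, hk, if_pos rfl]
  rw [pvAInner_skip exp n k (i - (k+1)) (k+1) i (by omega) (by omega) (by omega)
    (fun p hp1 hp2 => hrun p (by omega) hp2)]
  rw [pvAInner, dif_pos hi, hopi, if_pos rfl]
  exact pvAOuter_skip exp n (i - (k+1)) (k+1) i (by omega) (by omega) (by omega)
    (fun p hp1 hp2 => (hrun p (by omega) hp2).1)

-- A's outer loop restarted at a '(' whose next paren is a ')' at i returns exp[k:i+1]
theorem pvA_hit (exp : String) (n k i : Nat) (hkn : k < n) (hki : k < i) (hi : i < n)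
    (hk : (PySem.Str.pyGet? exp (k : Int) == some '(') = true)
    (hop : (PySem.Str.pyGet? exp (i : Int) == some '(') = false)
    (hcl : (PySem.Str.pyGet? exp (i : Int) == some ')') = true)
    (hrun : ∀ p, k < p → p < i → pvNonParen exp p) :
    pvAOuter exp n k = some (PySem.Str.slice exp (some (k : Int)) (some ((i : Int) + 1))) := by
  rw [pvAOuter, dif_pos hkn, hk, if_pos rfl]
  rw [pvAInner_skip exp n k (i - (k+1)) (k+1) i (by omega) (by omega) (by omega)
    (fun p hp1 hp2 => hrun p (by omega) hp2)]
  rw [pvAInner, dif_pos hi]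
  simp only [hop, hcl, Bool.false_eq_true, if_false, if_true]

-- core invariant: B's scan at i with last_open = k computes exactly what A's outer loop
-- computes restarted at k, when exp[k] = '(' and (k, i) contains no paren.
theorem pvB_invariant (exp : String) (n : Nat) :
    ∀ (m i k : Nat), n - i ≤ m → k < i → i ≤ n →
      (PySem.Str.pyGet? exp (k : Int) == some '(') = true →
      (∀ p, k < p → p < i → pvNonParen exp p) →
      pvBGo exp n i (some k) = pvAOuter exp n k := by
  intro m
  induction m with
  | zero =>
    intro i k h1 h2 h3 hk hrun
    have hi : i = n := by omega
    rw [pvBGo, dif_neg (by omega),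
      pvA_dead exp n k (by omega) hk (fun p hp1 hp2 => hrun p hp1 (by omega))]
  | succ m ih =>
    intro i k h1 h2 h3 hk hrun
    by_cases hi : i < n
    · by_cases hop : (PySem.Str.pyGet? exp (i : Int) == some '(') = true
      · rw [pvBGo, dif_pos hi, hop, if_pos rfl]
        rw [ih (i+1) i (by omega) (by omega) (by omega) hop (fun p hp1 hp2 => by omega)]
        exact (pvA_jump exp n k i (by omega) h2 hi hk hop hrun).symm
      · have hop' : (PySem.Str.pyGet? exp (i : Int) == some '(') = false :=
          Bool.eq_false_iff.mpr hop
        by_cases hcl : (PySem.Str.pyGet? exp (i : Int) == some ')') = true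
        · rw [pvBGo, dif_pos hi]
          simp only [hop', hcl, Bool.false_eq_true, if_false, if_true]
          exact (pvA_hit exp n k i (by omega) h2 hi hk hop' hcl hrun).symm
        · have hcl' : (PySem.Str.pyGet? exp (i : Int) == some ')') = false :=
            Bool.eq_false_iff.mpr hcl
          rw [pvBGo, dif_pos hi]
          simp only [hop', hcl', Bool.false_eq_true, if_false]
          exact ih (i+1) k (by omega) (by omega) (by omega) hk
            (fun p hp1 hp2 => by
              rcases Nat.lt_or_ge p i with h | h
              · exact hrun p hp1 h
              · have hpi : p = i := by omega
                exact hpi ▸ ⟨hop', hcl'⟩)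
    · rw [pvBGo, dif_neg (by omega),
        pvA_dead exp n k (by omega) hk (fun p hp1 hp2 => hrun p hp1 (by omega))]

-- with no pending '(' the two scans coincide position by position
theorem pvB_main (exp : String) (n : Nat) :
    ∀ (m i : Nat), n - i ≤ m → i ≤ n →
      pvBGo exp n i none = pvAOuter exp n i := by
  intro m
  induction m with
  | zero =>
    intro i h1 h2
    rw [pvBGo, dif_neg (by omega), pvAOuter, dif_neg (by omega)]
  | succ m ih =>
    intro i h1 h2
    by_cases hi : i < n
    · by_cases hop : (PySem.Str.pyGet? exp (i : Int) == some '(') = true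
      · rw [pvBGo, dif_pos hi, hop, if_pos rfl]
        exact pvB_invariant exp n m (i+1) i (by omega) (by omega) (by omega) hop
          (fun p hp1 hp2 => by omega)
      · have hop' : (PySem.Str.pyGet? exp (i : Int) == some '(') = false :=
          Bool.eq_false_iff.mpr hop
        have step : pvAOuter exp n i = pvAOuter exp n (i+1) := by
          rw [pvAOuter, dif_pos hi]
          simp only [hop', Bool.false_eq_true, if_false]
        rw [step]
        by_cases hcl : (PySem.Str.pyGet? exp (i : Int) == some ')') = true
        · rw [pvBGo, dif_pos hi]
          simp only [hop', Bool.false_eq_true, if_false, hcl, if_true]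
          exact ih (i+1) (by omega) (by omega)
        · rw [pvBGo, dif_pos hi]
          simp only [hop', Bool.eq_false_iff.mpr hcl, Bool.false_eq_true, if_false]
          exact ih (i+1) (by omega) (by omega)
    · rw [pvBGo, dif_neg (by omega), pvAOuter, dif_neg (by omega)]

-- ===== VERDICT (by name: the statement is the Claim_ definition above) =====
theorem identify_leaf_spec : Claim_equal_identify_leaf := by
  intro exp _
  unfold Spec_identify_leaf identify_leaf identify_leaf_alt
  rw [pvB_main exp exp.toList.length exp.toList.length 0 (by omega) (by omega)]
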